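-- pv_equiv track=rewrite | github.com/superbode/superbode | scripts/project_updater/views/markdown_view.py | _collect_tools_platform_icons_and_other
-- ===== SOURCE A (Python) =====
-- from typing import List
--
-- TOOL_PLATFORM_ICON_MAP = {
--     "visual studio": "visualstudio",
--     "vs": "visualstudio",
--     "vs code": "vscode",
--     "vscode": "vscode",
--     "intellij idea": "idea",
--     "intellij": "idea",
--     "pycharm": "pycharm",
--     "git": "git",
--     "github": "github",
--     "azure": "azure",
--     "azure devops": "azure",
--     "jira": "jira",
--     "trello": "trello",
--     "figma": "figma",
--     "docker": "docker",
--     "postman": "postman",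
-- }
--
-- def _dedupe_keep_order(items: List[str]) -> List[str]:
--     deduped = []
--     seen = set()
--     for item in items:
--         normalized = (item or "").strip()
--         if not normalized:
--             continue
--         key = normalized.lower()
--         if key in seen:
--             continue
--         seen.add(key)
--         deduped.append(normalized)
--     return deduped
--
-- def _collect_tools_platform_icons_and_other(skills: dict) -> tuple[List[str], List[str]]:
--     tools_platform_sources = []
--     for category in ("Tools", "Platforms", "Frameworks"):
--         tools_platform_sources.extend(skills.get(category, []))
--
--     icon_ids = []
--     others = []
--     for item in _dedupe_keep_order(tools_platform_sources):
--         icon_id = TOOL_PLATFORM_ICON_MAP.get((item or "").strip().lower())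
--         if icon_id:
--             icon_ids.append(icon_id)
--         else:
--             others.append(item)
--
--     return _dedupe_keep_order(icon_ids), others
-- ===== SOURCE B (Python) =====
-- from typing import List
--
-- TOOL_PLATFORM_ICON_MAP = {
--     "visual studio": "visualstudio",
--     "vs": "visualstudio",
--     "vs code": "vscode",
--     "vscode": "vscode",
--     "intellij idea": "idea",
--     "intellij": "idea",
--     "pycharm": "pycharm",
--     "git": "git",
--     "github": "github",
--     "azure": "azure",
--     "azure devops": "azure",
--     "jira": "jira",
--     "trello": "trello",
--     "figma": "figma",
--     "docker": "docker",
--     "postman": "postman",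
-- }
--
-- def _collect_tools_platform_icons_and_other(skills: dict) -> tuple[List[str], List[str]]:
--     icon_ids: List[str] = []
--     others: List[str] = []
--     seen_sources = set()
--     seen_icons = set()
--     for item in (skills.get("Tools", []) + skills.get("Platforms", []) + skills.get("Frameworks", [])):
--         normalized = (item or "").strip()
--         if not normalized:
--             continue
--         key = normalized.lower()
--         if key in seen_sources:
--             continue
--         seen_sources.add(key)
--         icon_id = TOOL_PLATFORM_ICON_MAP.get(key)
--         if icon_id is not None:
--             if icon_id not in seen_icons:
--                 seen_icons.add(icon_id)
--                 icon_ids.append(icon_id)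
--         else:
--             others.append(normalized)
--     return icon_ids, others
-- ===== Notes on version B (the rewrite author's own statement) =====
-- stated objective: simpler
-- what changed: A runs three passes (dedupe the concatenated sources, classify each into icon-id or other, then dedupe the icon ids with the same helper); B fuses everything into a single loop over the concatenated lists that maintains a seen-sources set and a seen-icons set, so the helper and both extra passes disappear.
import Mathlib
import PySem

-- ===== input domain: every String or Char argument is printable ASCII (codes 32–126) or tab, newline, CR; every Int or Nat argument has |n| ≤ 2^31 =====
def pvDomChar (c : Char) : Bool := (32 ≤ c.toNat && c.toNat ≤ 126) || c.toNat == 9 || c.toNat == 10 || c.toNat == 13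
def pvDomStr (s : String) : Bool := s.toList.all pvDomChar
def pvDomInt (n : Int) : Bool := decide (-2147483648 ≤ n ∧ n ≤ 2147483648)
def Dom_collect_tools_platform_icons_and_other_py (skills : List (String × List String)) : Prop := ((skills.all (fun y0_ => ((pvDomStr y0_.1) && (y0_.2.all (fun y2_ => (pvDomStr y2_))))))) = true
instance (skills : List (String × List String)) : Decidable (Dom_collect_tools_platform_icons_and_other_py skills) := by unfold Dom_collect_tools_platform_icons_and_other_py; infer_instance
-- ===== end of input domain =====

-- B fuses A's dedupe pass, classification pass and second icon-dedupe pass into one loop with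
-- two seen-sets (one pass over the data instead of three); return values proved identical.

-- ===== PORT A =====

-- Python `(s or "")` for a string s
def pyOrEmpty (s : String) : String := if s == "" then "" else s

def ICON_MAP : PySem.Dict String String := PySem.Dict.ofList [
  ("visual studio", "visualstudio"), ("vs", "visualstudio"), ("vs code", "vscode"),
  ("vscode", "vscode"), ("intellij idea", "idea"), ("intellij", "idea"),
  ("pycharm", "pycharm"), ("git", "git"), ("github", "github"), ("azure", "azure"),
  ("azure devops", "azure"), ("jira", "jira"), ("trello", "trello"), ("figma", "figma"),
  ("docker", "docker"), ("postman", "postman")]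


-- loop body of _dedupe_keep_order
def ddStep (st : List String × PySem.Set String) (item : String) : List String × PySem.Set String :=
  let normalized := PySem.Str.strip (pyOrEmpty item)
  if normalized == "" then st
  else
    let key := PySem.Str.lower normalized
    if PySem.Set.contains st.2 key then st
    else (st.1 ++ [normalized], PySem.Set.add st.2 key)

-- _dedupe_keep_order
def dedupe_keep_order_py (items : List String) : List String :=
  (items.foldl ddStep ([], PySem.Set.empty)).1

-- loop body of A's classification pass
def clsStep (st : List String × List String) (item : String) : List String × List String :=
  let icon_id := PySem.Dict.get? ICON_MAP (PySem.Str.lower (PySem.Str.strip (pyOrEmpty item)))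
  match icon_id with
  | some s => if s == "" then (st.1, st.2 ++ [item]) else (st.1 ++ [s], st.2)
  | none => (st.1, st.2 ++ [item])

def collect_tools_platform_icons_and_other_py (skills : List (String × List String)) : List String × List String :=
  let tools_platform_sources := ["Tools", "Platforms", "Frameworks"].foldl
      (fun acc category => acc ++ PySem.Dict.getD (PySem.Dict.mk skills) category []) []
  let st := (dedupe_keep_order_py tools_platform_sources).foldl clsStep ([], [])
  (dedupe_keep_order_py st.1, st.2)

-- ===== PORT B =====
-- loop body of B's fused pass
def bStep (st : List String × List String × PySem.Set String × PySem.Set String) (item : String) :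
    List String × List String × PySem.Set String × PySem.Set String :=
  let normalized := PySem.Str.strip (pyOrEmpty item)
  if normalized == "" then st
  else
    let key := PySem.Str.lower normalized
    if PySem.Set.contains st.2.2.1 key then st
    else
      let seenS := PySem.Set.add st.2.2.1 key
      match PySem.Dict.get? ICON_MAP key with
      | some icon_id =>
          if PySem.Set.contains st.2.2.2 icon_id then (st.1, st.2.1, seenS, st.2.2.2)
          else (st.1 ++ [icon_id], st.2.1, seenS, PySem.Set.add st.2.2.2 icon_id)
      | none => (st.1, st.2.1 ++ [normalized], seenS, st.2.2.2)

def collect_tools_platform_icons_and_other_py_alt (skills : List (String × List String)) : List String × List String :=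
  let d := PySem.Dict.mk skills
  let st := (PySem.Dict.getD d "Tools" [] ++ PySem.Dict.getD d "Platforms" [] ++ PySem.Dict.getD d "Frameworks" []).foldl
    bStep ([], [], PySem.Set.empty, PySem.Set.empty)
  (st.1, st.2.1)

-- ===== PRECONDITION & SPEC =====
def Spec_collect_tools_platform_icons_and_other_py (skills : List (String × List String)) (out : List String × List String) : Prop := out = collect_tools_platform_icons_and_other_py_alt skills
instance (skills : List (String × List String)) (out : List String × List String) : Decidable (Spec_collect_tools_platform_icons_and_other_py skills out) := by unfold Spec_collect_tools_platform_icons_and_other_py; infer_instance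

-- ===== CLAIM (what is proved, stated in full; the proofs are below) =====
def Claim_equal_collect_tools_platform_icons_and_other_py : Prop := ∀ (skills : List (String × List String)), Dom_collect_tools_platform_icons_and_other_py skills → Spec_collect_tools_platform_icons_and_other_py skills (collect_tools_platform_icons_and_other_py skills)

-- ===== LEMMAS AND PROOFS =====

-- recursive model of _dedupe_keep_order continuing from a given seen-set
def ddModel : List String → PySem.Set String → List String
  | [], _ => []
  | x :: r, s =>
    let n := PySem.Str.strip (pyOrEmpty x)
    if n == "" then ddModel r s
    else
      let k := PySem.Str.lower n
      if PySem.Set.contains s k then ddModel r s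
      else n :: ddModel r (PySem.Set.add s k)

-- recursive model of A's classification loop
def clsModel : List String → List String × List String
  | [] => ([], [])
  | x :: r =>
    let p := clsModel r
    match PySem.Dict.get? ICON_MAP (PySem.Str.lower (PySem.Str.strip (pyOrEmpty x))) with
    | some v => if v == "" then (p.1, x :: p.2) else (v :: p.1, p.2)
    | none => (p.1, x :: p.2)

-- recursive model of B's fused loop
def fusedModel : List String → PySem.Set String → PySem.Set String → List String × List String
  | [], _, _ => ([], [])
  | x :: r, sS, sI =>
    let n := PySem.Str.strip (pyOrEmpty x)
    if n == "" then fusedModel r sS sI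
    else
      let k := PySem.Str.lower n
      if PySem.Set.contains sS k then fusedModel r sS sI
      else
        match PySem.Dict.get? ICON_MAP k with
        | some v =>
            if PySem.Set.contains sI v then fusedModel r (PySem.Set.add sS k) sI
            else
              let p := fusedModel r (PySem.Set.add sS k) (PySem.Set.add sI v)
              (v :: p.1, p.2)
        | none =>
            let p := fusedModel r (PySem.Set.add sS k) sI
            (p.1, n :: p.2)

lemma dw_idem (p : Char → Bool) (l : List Char) :
    List.dropWhile p (List.dropWhile p l) = List.dropWhile p l := by
  cases hdw : List.dropWhile p l with
  | nil => rfl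
  | cons a t =>
    have h := List.head?_dropWhile_not p l
    rw [hdw] at h; simp at h
    simp [h]

lemma rs_prefix (p : Char → Bool) (l : List Char) : (List.dropWhile p l.reverse).reverse <+: l := by
  have h := List.dropWhile_suffix (l := l.reverse) p
  have := List.reverse_prefix.mpr h
  simpa using this

lemma lstrip_rstrip (p : Char → Bool) (l : List Char) (h : List.dropWhile p l = l) :
    List.dropWhile p ((List.dropWhile p l.reverse).reverse) = (List.dropWhile p l.reverse).reverse := by
  cases hdw : (List.dropWhile p l.reverse).reverse with
  | nil => rfl
  | cons a t =>
    have hpre := rs_prefix p l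
    rw [hdw] at hpre
    rcases hpre with ⟨u, hu⟩
    have hla : l = a :: (t ++ u) := by rw [← hu]; simp
    have hpa : p a = false := by
      rw [hla] at h
      by_contra hpa
      simp at hpa
      simp [hpa] at h
      have hlen := congrArg List.length h
      simp at hlen
      have := List.length_dropWhile_le (p := p) (l := t ++ u)
      simp only [List.length_append] at this ⊢
      omega
    simp [hpa]

lemma chars_strip_idem (l : List Char) : PySem.Chars.strip (PySem.Chars.strip l) = PySem.Chars.strip l := by
  unfold PySem.Chars.strip PySem.Chars.rstrip PySem.Chars.lstrip
  rw [lstrip_rstrip PySem.Chars.isspace (List.dropWhile PySem.Chars.isspace l) (dw_idem _ _)]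
  rw [List.reverse_reverse, dw_idem]

lemma strip_idem (s : String) : PySem.Str.strip (PySem.Str.strip s) = PySem.Str.strip s := by
  apply String.toList_injective
  rw [PySem.Str.toList_strip, PySem.Str.toList_strip, chars_strip_idem]

lemma icon_map_value {k v : String} (h : PySem.Dict.get? ICON_MAP k = some v) :
    PySem.Str.strip v = v ∧ PySem.Str.lower v = v ∧ (v == "") = false := by
  have hm := PySem.Dict.mem_items_of_get?_eq_some ICON_MAP h
  have hit : ICON_MAP.items = [
    ("visual studio", "visualstudio"), ("vs", "visualstudio"), ("vs code", "vscode"),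
    ("vscode", "vscode"), ("intellij idea", "idea"), ("intellij", "idea"),
    ("pycharm", "pycharm"), ("git", "git"), ("github", "github"), ("azure", "azure"),
    ("azure devops", "azure"), ("jira", "jira"), ("trello", "trello"), ("figma", "figma"),
    ("docker", "docker"), ("postman", "postman")] := by decide
  rw [hit] at hm
  simp only [List.mem_cons, List.not_mem_nil, or_false, Prod.mk.injEq] at hm
  rcases hm with ⟨-,h⟩|⟨-,h⟩|⟨-,h⟩|⟨-,h⟩|⟨-,h⟩|⟨-,h⟩|⟨-,h⟩|⟨-,h⟩|⟨-,h⟩|⟨-,h⟩|⟨-,h⟩|⟨-,h⟩|⟨-,h⟩|⟨-,h⟩|⟨-,h⟩|⟨-,h⟩ <;>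
    subst h <;> exact ⟨by decide, by decide, by decide⟩

lemma pyOrEmpty_eq (s : String) : pyOrEmpty s = s := by
  unfold pyOrEmpty; split <;> simp_all

-- A's dedupe foldl with accumulator = ddModel
lemma dd_fold (items : List String) : ∀ (acc : List String) (seen : PySem.Set String),
    (items.foldl ddStep (acc, seen)).1 = acc ++ ddModel items seen := by
  induction items with
  | nil => intro acc seen; simp [ddModel]
  | cons x r ih =>
    intro acc seen
    simp only [List.foldl_cons, ddStep, ddModel]
    by_cases h1 : (PySem.Str.strip (pyOrEmpty x) == "") = true
    · simp only [h1, eq_self_iff_true, if_true, if_false, ih]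
    · by_cases h2 : PySem.Set.contains seen (PySem.Str.lower (PySem.Str.strip (pyOrEmpty x))) = true
      · simp only [h2, eq_false_of_ne_true h1, Bool.false_eq_true, eq_self_iff_true, if_true, if_false, ih]
      · simp only [eq_false_of_ne_true h1, eq_false_of_ne_true h2, Bool.false_eq_true, eq_self_iff_true, if_true, if_false, ih]
        simp

-- A's classification foldl with accumulators = clsModel
lemma cls_fold (items : List String) : ∀ (i o : List String),
    items.foldl clsStep (i, o) = (i ++ (clsModel items).1, o ++ (clsModel items).2) := by
  induction items with
  | nil => intro i o; simp [clsModel]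
  | cons x r ih =>
    intro i o
    simp only [List.foldl_cons, clsStep, clsModel]
    cases hmap : PySem.Dict.get? ICON_MAP (PySem.Str.lower (PySem.Str.strip (pyOrEmpty x))) with
    | none => simp only [hmap, ih]; simp
    | some v =>
      by_cases hv : (v == "") = true
      · simp only [hmap, hv, eq_self_iff_true, if_true, ih]; simp
      · simp only [hmap, eq_false_of_ne_true hv, Bool.false_eq_true, if_false, ih]; simp

-- B's fused foldl with accumulators = fusedModel (output components)
lemma fused_fold (items : List String) : ∀ (i o : List String) (sS sI : PySem.Set String),
    (((items.foldl bStep (i, o, sS, sI)).1, (items.foldl bStep (i, o, sS, sI)).2.1))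
      = (i ++ (fusedModel items sS sI).1, o ++ (fusedModel items sS sI).2) := by
  induction items with
  | nil => intro i o sS sI; simp only [List.foldl_nil, fusedModel, List.append_nil]
  | cons x r ih =>
    intro i o sS sI
    cases hmap : PySem.Dict.get? ICON_MAP (PySem.Str.lower (PySem.Str.strip (pyOrEmpty x))) with
    | none =>
      by_cases h1 : (PySem.Str.strip (pyOrEmpty x) == "") = true
      · simp only [List.foldl_cons, bStep, fusedModel, hmap, h1, eq_self_iff_true, if_true, ih]
      · by_cases h2 : PySem.Set.contains sS (PySem.Str.lower (PySem.Str.strip (pyOrEmpty x))) = true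
        · simp only [List.foldl_cons, bStep, fusedModel, hmap, h2, eq_false_of_ne_true h1,
            Bool.false_eq_true, eq_self_iff_true, if_true, if_false, ih]
        · simp only [List.foldl_cons, bStep, fusedModel, hmap, eq_false_of_ne_true h1,
            eq_false_of_ne_true h2, Bool.false_eq_true, eq_self_iff_true, if_true, if_false, ih]
          simp
    | some v =>
      by_cases h1 : (PySem.Str.strip (pyOrEmpty x) == "") = true
      · simp only [List.foldl_cons, bStep, fusedModel, hmap, h1, eq_self_iff_true, if_true, ih]
      · by_cases h2 : PySem.Set.contains sS (PySem.Str.lower (PySem.Str.strip (pyOrEmpty x))) = true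
        · simp only [List.foldl_cons, bStep, fusedModel, hmap, h2, eq_false_of_ne_true h1,
            Bool.false_eq_true, eq_self_iff_true, if_true, if_false, ih]
        · by_cases h3 : PySem.Set.contains sI v = true
          · simp only [List.foldl_cons, bStep, fusedModel, hmap, h3, eq_false_of_ne_true h1,
              eq_false_of_ne_true h2, Bool.false_eq_true, eq_self_iff_true, if_true, if_false, ih]
          · simp only [List.foldl_cons, bStep, fusedModel, hmap, eq_false_of_ne_true h1,
              eq_false_of_ne_true h2, eq_false_of_ne_true h3, Bool.false_eq_true, eq_self_iff_true,
              if_true, if_false, ih]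
            simp

-- the staged pipeline equals the fused loop
lemma staged_eq_fused (items : List String) : ∀ (sS sI : PySem.Set String),
    (ddModel (clsModel (ddModel items sS)).1 sI, (clsModel (ddModel items sS)).2)
      = fusedModel items sS sI := by
  induction items with
  | nil => intro sS sI; simp only [ddModel, clsModel, fusedModel]
  | cons x r ih =>
    intro sS sI
    cases hmap : PySem.Dict.get? ICON_MAP (PySem.Str.lower (PySem.Str.strip x)) with
    | none =>
      by_cases h1 : (PySem.Str.strip x == "") = true
      · simp only [ddModel, fusedModel, pyOrEmpty_eq, strip_idem, hmap, h1, eq_self_iff_true,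
          if_true]
        exact ih sS sI
      · by_cases h2 : PySem.Set.contains sS (PySem.Str.lower (PySem.Str.strip x)) = true
        · simp only [ddModel, fusedModel, pyOrEmpty_eq, strip_idem, hmap, h2,
            eq_false_of_ne_true h1, Bool.false_eq_true, eq_self_iff_true, if_true, if_false]
          exact ih sS sI
        · simp only [ddModel, clsModel, fusedModel, pyOrEmpty_eq, strip_idem, hmap,
            eq_false_of_ne_true h1, eq_false_of_ne_true h2, Bool.false_eq_true, eq_self_iff_true,
            if_true, if_false]
          have h := ih (PySem.Set.add sS (PySem.Str.lower (PySem.Str.strip x))) sI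
          have hfst := congrArg Prod.fst h
          have hsnd := congrArg Prod.snd h
          simp only at hfst hsnd
          rw [hfst, hsnd]
    | some v =>
      obtain ⟨hv1, hv2, hv3⟩ := icon_map_value hmap
      by_cases h1 : (PySem.Str.strip x == "") = true
      · simp only [ddModel, fusedModel, pyOrEmpty_eq, strip_idem, hmap, h1, eq_self_iff_true,
          if_true]
        exact ih sS sI
      · by_cases h2 : PySem.Set.contains sS (PySem.Str.lower (PySem.Str.strip x)) = true
        · simp only [ddModel, fusedModel, pyOrEmpty_eq, strip_idem, hmap, h2,
            eq_false_of_ne_true h1, Bool.false_eq_true, eq_self_iff_true, if_true, if_false]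
          exact ih sS sI
        · by_cases h3 : PySem.Set.contains sI v = true
          · simp only [ddModel, clsModel, fusedModel, pyOrEmpty_eq, strip_idem, hmap, hv1, hv2,
              hv3, h3, eq_false_of_ne_true h1, eq_false_of_ne_true h2, Bool.false_eq_true,
              eq_self_iff_true, if_true, if_false]
            have h := ih (PySem.Set.add sS (PySem.Str.lower (PySem.Str.strip x))) sI
            have hfst := congrArg Prod.fst h
            have hsnd := congrArg Prod.snd h
            simp only at hfst hsnd
            rw [hfst, hsnd]
          · simp only [ddModel, clsModel, fusedModel, pyOrEmpty_eq, strip_idem, hmap, hv1, hv2,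
              hv3, h3, eq_false_of_ne_true h1, eq_false_of_ne_true h2, eq_false_of_ne_true h3,
              Bool.false_eq_true, eq_self_iff_true, if_true, if_false]
            have h := ih (PySem.Set.add sS (PySem.Str.lower (PySem.Str.strip x)))
              (PySem.Set.add sI v)
            have hfst := congrArg Prod.fst h
            have hsnd := congrArg Prod.snd h
            simp only at hfst hsnd
            rw [hfst, hsnd]

-- ===== VERDICT (by name: the statement is the Claim_ definition above) =====
theorem collect_tools_platform_icons_and_other_py_spec : Claim_equal_collect_tools_platform_icons_and_other_py := by
  intro skills _
  unfold Spec_collect_tools_platform_icons_and_other_py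
  have hA : collect_tools_platform_icons_and_other_py skills
      = fusedModel (PySem.Dict.getD (PySem.Dict.mk skills) "Tools" []
          ++ PySem.Dict.getD (PySem.Dict.mk skills) "Platforms" []
          ++ PySem.Dict.getD (PySem.Dict.mk skills) "Frameworks" [])
          PySem.Set.empty PySem.Set.empty := by
    unfold collect_tools_platform_icons_and_other_py dedupe_keep_order_py
    simp only [List.foldl_cons, List.foldl_nil, List.nil_append, List.append_assoc, dd_fold,
      cls_fold, staged_eq_fused]
  have hB : collect_tools_platform_icons_and_other_py_alt skills
      = fusedModel (PySem.Dict.getD (PySem.Dict.mk skills) "Tools" []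
          ++ PySem.Dict.getD (PySem.Dict.mk skills) "Platforms" []
          ++ PySem.Dict.getD (PySem.Dict.mk skills) "Frameworks" [])
          PySem.Set.empty PySem.Set.empty := by
    unfold collect_tools_platform_icons_and_other_py_alt
    have h := fused_fold (PySem.Dict.getD (PySem.Dict.mk skills) "Tools" []
          ++ PySem.Dict.getD (PySem.Dict.mk skills) "Platforms" []
          ++ PySem.Dict.getD (PySem.Dict.mk skills) "Frameworks" []) [] []
          PySem.Set.empty PySem.Set.empty
    simpa using h
  rw [hA, hB]
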